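-- pv_equiv track=rewrite | github.com/peachyplayzrb/thesis | _personal_impl/src/transparency.py | build_ordered_components
-- ===== SOURCE A (Python) =====
-- from typing import Any, Mapping, Sequence, cast
--
-- COMPONENT_ORDER = [
--     "tempo",
--     "duration_ms",
--     "key",
--     "mode",
--     "lead_genre",
--     "genre_overlap",
--     "tag_overlap",
-- ]
--
-- def canonical_component_name(name: str) -> str:
--     return name.removesuffix("_score")
--
-- def build_ordered_components(active_weights: Mapping[str, object]) -> list[str]:
--     ordered_components: list[str] = []
--     active_keys = list(active_weights.keys())
--     for canonical in COMPONENT_ORDER: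
--         for component in active_keys:
--             if (
--                 canonical_component_name(component) == canonical
--                 and component not in ordered_components
--             ):
--                 ordered_components.append(component)
--     ordered_set = set(ordered_components)
--     ordered_components.extend(
--         sorted(component for component in active_keys if component not in ordered_set)
--     )
--     return ordered_components
-- ===== SOURCE B (Python) =====
-- COMPONENT_ORDER = [
--     "tempo",
--     "duration_ms",
--     "key",
--     "mode",
--     "lead_genre",
--     "genre_overlap",
--     "tag_overlap",
-- ]
--
-- _CANONICAL_SET = frozenset(COMPONENT_ORDER)
--
-- def canonical_component_name(name: str) -> str:
--     return name.removesuffix("_score")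
--
-- def build_ordered_components(active_weights):
--     # One pass: group matched keys into per-canonical buckets, collect the rest.
--     buckets: dict[str, list[str]] = {}
--     misc: list[str] = []
--     for component in active_weights.keys():
--         canonical = canonical_component_name(component)
--         if canonical in _CANONICAL_SET:
--             buckets.setdefault(canonical, []).append(component)
--         else:
--             misc.append(component)
--     ordered = [c for canonical in COMPONENT_ORDER for c in buckets.get(canonical, [])]
--     ordered.extend(sorted(misc))
--     return ordered
-- ===== Notes on version B (the rewrite author's own statement) =====
-- stated objective: alternative
-- what changed: A rescans all keys once per canonical component (with a list-membership dedup test) and then set-filters the rest; B makes a single pass over the keys that groups matched keys into per-canonical buckets (dict of lists) and collects unmatched keys, then concatenates the buckets in canonical order and appends the sorted leftovers.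
import Mathlib
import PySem

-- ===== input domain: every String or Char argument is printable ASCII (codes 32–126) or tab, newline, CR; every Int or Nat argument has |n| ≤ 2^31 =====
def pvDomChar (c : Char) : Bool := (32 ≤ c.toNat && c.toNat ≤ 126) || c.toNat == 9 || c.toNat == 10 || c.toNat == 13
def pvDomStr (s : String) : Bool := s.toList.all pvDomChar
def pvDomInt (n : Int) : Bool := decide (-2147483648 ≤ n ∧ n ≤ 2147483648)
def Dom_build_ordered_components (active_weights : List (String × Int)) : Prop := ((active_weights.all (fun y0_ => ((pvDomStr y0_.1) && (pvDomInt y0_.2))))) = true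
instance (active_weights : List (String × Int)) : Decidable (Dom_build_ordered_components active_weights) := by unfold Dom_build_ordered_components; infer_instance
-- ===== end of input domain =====

-- B replaces A's nested scan (for each canonical, rescan all keys) by ONE pass over the keys
-- that groups them into per-canonical buckets plus a misc list; same return value.

-- ===== PORT A =====
-- module-level constant COMPONENT_ORDER (shared by both Pythons)
def componentOrder : List String :=
  ["tempo", "duration_ms", "key", "mode", "lead_genre", "genre_overlap", "tag_overlap"]

-- module-level helper canonical_component_name (shared by both Pythons):
-- name.removesuffix("_score") — exact: drops the suffix iff the string ends with it
def canonicalComponentName (name : String) : String :=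
  let cs := name.toList
  if PySem.Chars.endswith cs ['_', 's', 'c', 'o', 'r', 'e'] then
    String.ofList (cs.take (cs.length - 6))
  else name

def build_ordered_components (active_weights : List (String × Int)) : List String :=
  -- list(active_weights.keys()): distinct keys, first-insertion order
  let active_keys := PySem.List.dedup (active_weights.map (·.1))
  let ordered := componentOrder.foldl (fun acc canonical =>
    active_keys.foldl (fun acc component =>
      if canonicalComponentName component = canonical ∧ component ∉ acc then
        acc ++ [component]
      else acc) acc) []
  let orderedSet : PySem.Set String := PySem.Set.ofList ordered
  ordered ++ PySem.List.sorted
    (active_keys.filter (fun component => !(PySem.Set.contains orderedSet component)))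
    (fun x => x) false

-- ===== PORT B =====
def build_ordered_components_alt (active_weights : List (String × Int)) : List String :=
  let grouped := (PySem.List.dedup (active_weights.map (·.1))).foldl
    (fun (s : PySem.Dict String (List String) × List String) component =>
      let canonical := canonicalComponentName component
      if canonical ∈ componentOrder then
        (s.1.modify canonical [] (· ++ [component]), s.2)
      else
        (s.1, s.2 ++ [component]))
    (PySem.Dict.empty, [])
  componentOrder.flatMap (fun canonical => grouped.1.getD canonical []) ++
    PySem.List.sorted grouped.2 (fun x => x) false

-- ===== PRECONDITION & SPEC =====
def Spec_build_ordered_components (active_weights : List (String × Int)) (out : List String) : Prop := out = build_ordered_components_alt active_weights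
instance (active_weights : List (String × Int)) (out : List String) : Decidable (Spec_build_ordered_components active_weights out) := by unfold Spec_build_ordered_components; infer_instance

-- ===== CLAIM (what is proved, stated in full; the proofs are below) =====
def Claim_equal_build_ordered_components : Prop := ∀ (active_weights : List (String × Int)), Dom_build_ordered_components active_weights → Spec_build_ordered_components active_weights (build_ordered_components active_weights)

-- ===== LEMMAS AND PROOFS =====

-- A's inner loop over the (distinct) keys: with the membership test never firing,
-- it appends exactly the keys whose canonical name is `c`.
lemma innerA_eq (c : String) (ks : List String) (acc : List String)
    (hnd : ks.Nodup) (hfresh : ∀ k ∈ ks, canonicalComponentName k = c → k ∉ acc) :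
    ks.foldl (fun a k =>
      if canonicalComponentName k = c ∧ k ∉ a then a ++ [k] else a) acc
    = acc ++ ks.filter (fun k => canonicalComponentName k == c) := by
  induction ks generalizing acc with
  | nil => simp
  | cons k t ih =>
    simp only [List.nodup_cons] at hnd
    by_cases hc : canonicalComponentName k = c
    · have hk : k ∉ acc := hfresh k (by simp) hc
      simp only [List.foldl_cons, List.filter_cons, hc, hk, not_false_iff, and_self, if_pos,
        beq_self_eq_true]
      rw [ih (acc ++ [k]) hnd.2 ?_]
      · simp
      · intro x hx hcx
        simp only [List.mem_append, List.mem_singleton]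
        rintro (h | rfl)
        · exact hfresh x (by simp [hx]) hcx h
        · exact hnd.1 hx
    · simp only [List.foldl_cons, List.filter_cons, hc, false_and, if_false,
        beq_iff_eq, decide_eq_true_eq, if_neg hc]
      exact ih acc hnd.2 (fun x hx hcx => hfresh x (by simp [hx]) hcx)

lemma outerA_eq (L : List String) (ks : List String) (acc : List String)
    (hks : ks.Nodup) (hL : L.Nodup) (hacc : ∀ x ∈ acc, canonicalComponentName x ∉ L) :
    L.foldl (fun a c => ks.foldl (fun a k =>
      if canonicalComponentName k = c ∧ k ∉ a then a ++ [k] else a) a) acc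
    = acc ++ L.flatMap (fun c => ks.filter (fun k => canonicalComponentName k == c)) := by
  induction L generalizing acc with
  | nil => simp
  | cons c t ih =>
    simp only [List.nodup_cons] at hL
    simp only [List.foldl_cons, List.flatMap_cons]
    rw [innerA_eq c ks acc hks (fun k _ hck h => hacc k h (by simp [hck]))]
    rw [ih (acc ++ ks.filter (fun k => canonicalComponentName k == c)) hL.2 ?_]
    · simp
    · intro x hx
      rcases List.mem_append.mp hx with h | h
      · exact fun hm => hacc x h (by simp [hm])
      · have := (List.mem_filter.mp h).2
        simp only [beq_iff_eq] at this
        rw [this]; exact hL.1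

-- B's single pass with a pair accumulator splits into a dict fold and a filter.
lemma pairFoldB (ks : List String) (d : PySem.Dict String (List String)) (m : List String) :
    ks.foldl (fun (s : PySem.Dict String (List String) × List String) component =>
      let canonical := canonicalComponentName component
      if canonical ∈ componentOrder then
        (s.1.modify canonical [] (· ++ [component]), s.2)
      else
        (s.1, s.2 ++ [component])) (d, m)
    = ((ks.filter (fun k => decide (canonicalComponentName k ∈ componentOrder))).foldl
        (fun d k => d.modify (canonicalComponentName k) [] (· ++ [k])) d,
       m ++ ks.filter (fun k => !decide (canonicalComponentName k ∈ componentOrder))) := by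
  induction ks generalizing d m with
  | nil => simp
  | cons k t ih =>
    by_cases h : canonicalComponentName k ∈ componentOrder <;>
      simp [h, ih]

-- the bucket of canonical `c` after the dict fold is exactly the keys mapping to `c`
lemma bucketB_eq (ks : List String) (c : String) (d : PySem.Dict String (List String)) :
    (ks.foldl (fun d k => d.modify (canonicalComponentName k) [] (· ++ [k])) d).getD c []
    = d.getD c [] ++ ks.filter (fun k => canonicalComponentName k == c) := by
  have h1 : ks.foldl (fun d k => d.modify (canonicalComponentName k) [] (· ++ [k])) d
      = (ks.map (fun k => (canonicalComponentName k, k))).foldl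
          (fun d p => d.modify p.1 [] (· ++ [p.2])) d := by
    rw [List.foldl_map]
  rw [h1, PySem.Dict.getD_foldl_modify_append, List.filter_map, List.map_map]
  congr 1
  have : ((fun p => p.1 == c) ∘ fun k => (canonicalComponentName k, k))
      = fun k => canonicalComponentName k == c := by funext k; rfl
  rw [this]
  show List.map ((fun p => p.2) ∘ fun k => (canonicalComponentName k, k)) _ = _
  simp [Function.comp_def]

-- membership in the flatMap-of-filters normal form
lemma mem_flat_iff (ks : List String) (k : String) (hk : k ∈ ks) :
    (k ∈ componentOrder.flatMap (fun c => ks.filter (fun x => canonicalComponentName x == c)))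
    ↔ canonicalComponentName k ∈ componentOrder := by
  simp only [List.mem_flatMap, List.mem_filter, beq_iff_eq]
  constructor
  · rintro ⟨c, hc, _, rfl⟩; exact hc
  · intro h; exact ⟨canonicalComponentName k, h, hk, rfl⟩

-- ===== VERDICT (by name: the statement is the Claim_ definition above) =====
theorem build_ordered_components_spec : Claim_equal_build_ordered_components := by
  intro aw _
  unfold Spec_build_ordered_components build_ordered_components build_ordered_components_alt
  simp only []
  set ks := PySem.List.dedup (aw.map (·.1)) with hks
  have hnd : ks.Nodup := by
    rw [hks, PySem.List.dedup_eq_ofList]; exact PySem.Set.nodup_ofList _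
  have hCO : componentOrder.Nodup := by decide
  rw [outerA_eq componentOrder ks [] hnd hCO (by simp), pairFoldB]
  simp only [List.nil_append]
  congr 1
  · -- ordered part: A's flatMap of filters = B's bucket concatenation
    apply List.flatMap_congr
    intro c hc
    rw [bucketB_eq, PySem.Dict.getD_empty, List.nil_append, List.filter_filter]
    apply List.filter_congr
    intro k hk
    by_cases h : canonicalComponentName k = c
    · simp [h, hc]
    · simp [h]
  · -- tail: the unmatched keys, sorted
    congr 1
    apply List.filter_congr
    intro k hk
    have := mem_flat_iff ks k hk
    by_cases h : canonicalComponentName k ∈ componentOrder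
    · simp [PySem.Set.mem_ofList, this, h]
    · simp [PySem.Set.mem_ofList, this, h]
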